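-- pv_equiv track=rewrite | github.com/legacy-ai-labs/mcp-server-language-converter | src/core/services/cobol_analysis/asg_builder_service.py | _calculate_picture_size
-- ===== SOURCE A (Python) =====
-- def _calculate_picture_size(pic_str: str) -> int:
--     """Calculate size from PICTURE string."""
--     size = 0
--     i = 0
--     pic_upper = pic_str.upper()
--
--     while i < len(pic_upper):
--         char = pic_upper[i]
--
--         if char == "(":
--             # Find the number in parentheses
--             j = i + 1
--             num_str = ""
--             while j < len(pic_upper) and pic_upper[j] != ")":
--                 num_str += pic_upper[j]
--                 j += 1
--             try:
--                 repeat = int(num_str)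
--                 size += repeat - 1  # -1 because the char before was already counted
--             except ValueError:
--                 pass
--             i = j + 1
--         elif char in "9AXVSPZ*$":
--             size += 1
--             i += 1
--         else:
--             i += 1
--
--     return max(1, size)
-- ===== SOURCE B (Python) =====
-- SYMS = "9AXVSPZ*$"
--
-- def _calculate_picture_size(pic_str: str) -> int:
--     s = pic_str.upper()
--     size = 0
--     pos = 0
--     while True:
--         open_i = s.find('(', pos)
--         seg = s[pos:] if open_i < 0 else s[pos:open_i]
--         size += sum(c in SYMS for c in seg)
--         if open_i < 0:
--             break
--         close_i = s.find(')', open_i + 1)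
--         num = s[open_i + 1:] if close_i < 0 else s[open_i + 1:close_i]
--         try:
--             size += int(num) - 1
--         except ValueError:
--             pass
--         if close_i < 0:
--             break
--         pos = close_i + 1
--     return max(1, size)
-- ===== Notes on version B (the rewrite author's own statement) =====
-- stated objective: idiomatic
-- what changed: Replaces A's char-by-char index loop with its hand-written inner digit-collecting while loop by a find-and-slice loop: jump to the next opening parenthesis with str.find, count symbol characters of the whole intervening slice with sum(), slice out the parenthesised repeat count, and resume after the closing parenthesis.
import Mathlib
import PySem

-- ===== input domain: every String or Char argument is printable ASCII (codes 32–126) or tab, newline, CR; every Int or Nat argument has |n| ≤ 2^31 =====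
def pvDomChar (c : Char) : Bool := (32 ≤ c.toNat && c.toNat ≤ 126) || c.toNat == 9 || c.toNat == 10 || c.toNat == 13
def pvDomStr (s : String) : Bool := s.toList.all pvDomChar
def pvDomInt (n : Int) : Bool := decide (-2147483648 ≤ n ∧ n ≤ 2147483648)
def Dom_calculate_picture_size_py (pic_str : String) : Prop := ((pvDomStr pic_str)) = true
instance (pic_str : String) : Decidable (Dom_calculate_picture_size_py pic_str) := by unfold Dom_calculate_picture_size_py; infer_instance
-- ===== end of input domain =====

-- B replaces A's char-by-char index loop (with its hand-written inner digit-collecting loop)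
-- by a find-and-slice decomposition: jump to the next opening parenthesis with find, count
-- symbol characters in the intervening slice at once, slice out the parenthesised repeat
-- count, resume after the closing parenthesis.  Same asymptotic cost; a timing run
-- measured B faster by a constant factor (bulk slice counting vs per-character stepping).

-- ===== PORT A =====
-- inner while loop of A: collect chars of num_str up to ')' (or end), return (num_str, rest after the ')')
def pvACollect : List Char → List Char × List Char
  | [] => ([], [])
  | c :: rest =>
    if c = ')' then ([], rest)
    else
      let (n, r) := pvACollect rest
      (c :: n, r)

-- termination measure for A's outer while loop (i = j + 1 jumps forward)
theorem pvACollect_len_le : ∀ (l : List Char), (pvACollect l).2.length ≤ l.length := by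
  intro l
  induction l with
  | nil => simp [pvACollect]
  | cons c rest ih =>
    simp only [pvACollect]
    split
    · simp
    · simpa using Nat.le_succ_of_le ih

-- A's outer while loop over the remaining characters (size accumulated by summation)
def pvALoop : List Char → Int
  | [] => 0
  | c :: rest =>
    if c = '(' then
      (match PySem.Int.ofStr? (String.ofList (pvACollect rest).1) with
       | some repeat_ => repeat_ - 1
       | none => 0) + pvALoop (pvACollect rest).2
    else if c ∈ "9AXVSPZ*$".toList then
      1 + pvALoop rest
    else
      pvALoop rest
termination_by l => l.length
decreasing_by
  · exact Nat.lt_succ_of_le (pvACollect_len_le rest)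
  · simp
  · simp

def calculate_picture_size_py (pic_str : String) : Int :=
  max 1 (pvALoop (PySem.Str.upper pic_str).toList)

-- ===== PORT B =====
-- count of PICTURE symbol characters in a segment (B's sum(c in SYMS for c in seg))
def pvBCount (l : List Char) : Int :=
  (l.countP (fun c => c ∈ "9AXVSPZ*$".toList) : Nat)

-- B's find-and-slice loop: takeWhile/dropWhile realise s.find('(', pos) and the slices
def pvBLoop (s : List Char) : Int :=
  match h : s.dropWhile (· ≠ '(') with
  | [] => pvBCount s
  | _ :: after =>
    let cnt := pvBCount (s.takeWhile (· ≠ '('))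
    let add :=
      match PySem.Int.ofStr? (String.ofList (after.takeWhile (· ≠ ')'))) with
      | some n => n - 1
      | none => 0
    match h2 : after.dropWhile (· ≠ ')') with
    | [] => cnt + add
    | _ :: tail => cnt + add + pvBLoop tail
termination_by s.length
decreasing_by
  have h1 : after.length < s.length := by
    have := List.length_dropWhile_le (p := (· ≠ '(')) (l := s)
    rw [h] at this; simpa using this
  have h2' : tail.length < after.length := by
    have := List.length_dropWhile_le (p := (· ≠ ')')) (l := after)
    rw [h2] at this; simpa using this
  omega

def calculate_picture_size_py_alt (pic_str : String) : Int :=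
  max 1 (pvBLoop (PySem.Str.upper pic_str).toList)

-- ===== PRECONDITION & SPEC =====
def Spec_calculate_picture_size_py (pic_str : String) (out : Int) : Prop := out = calculate_picture_size_py_alt pic_str
instance (pic_str : String) (out : Int) : Decidable (Spec_calculate_picture_size_py pic_str out) := by unfold Spec_calculate_picture_size_py; infer_instance

-- ===== CLAIM (what is proved, stated in full; the proofs are below) =====
def Claim_equal_calculate_picture_size_py : Prop := ∀ (pic_str : String), Dom_calculate_picture_size_py pic_str → Spec_calculate_picture_size_py pic_str (calculate_picture_size_py pic_str)

-- ===== LEMMAS AND PROOFS =====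

-- the head of a nonempty dropWhile fails the predicate
theorem pvDropWhile_head_false {α : Type} {p : α → Bool} :
    ∀ (l : List α) (x : α) (xs : List α), l.dropWhile p = x :: xs → p x = false := by
  intro l
  induction l with
  | nil => intro x xs h; simp at h
  | cons a tl ih =>
    intro x xs h
    rw [List.dropWhile_cons] at h
    by_cases ha : p a = true
    · rw [if_pos ha] at h; exact ih x xs h
    · rw [if_neg ha] at h
      injection h with h1 _
      subst h1
      simpa using ha

-- pvACollect is takeWhile/dropWhile-past-the-')' in one pass
theorem pvACollect_eq (l : List Char) :
    pvACollect l = (l.takeWhile (· ≠ ')'), (l.dropWhile (· ≠ ')')).drop 1) := by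
  induction l with
  | nil => simp [pvACollect]
  | cons c rest ih =>
    by_cases hc : c = ')'
    · simp [pvACollect, hc]
    · simp [pvACollect, hc, ih]

-- A's loop over a '('-free segment counts exactly the symbol characters
theorem pvALoop_append (seg rest : List Char) (hseg : '(' ∉ seg) :
    pvALoop (seg ++ rest) = pvBCount seg + pvALoop rest := by
  induction seg with
  | nil => simp [pvBCount]
  | cons c tl ih =>
    have hc : c ≠ '(' := by intro h; exact hseg (h ▸ List.mem_cons_self ..)
    have htl : '(' ∉ tl := fun h => hseg (List.mem_cons_of_mem _ h)
    by_cases hmem : c ∈ "9AXVSPZ*$".toList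
    · simp only [List.cons_append, pvALoop, if_neg hc, if_pos hmem, ih htl,
        pvBCount, List.countP_cons]
      simp only [hmem, decide_true, if_pos]
      push_cast
      ring
    · simp only [List.cons_append, pvALoop, if_neg hc, if_neg hmem, ih htl,
        pvBCount, List.countP_cons]
      simp only [hmem, decide_false, if_neg, Bool.false_eq_true, not_false_iff, add_zero]

theorem pvTakeWhile_no_open (s : List Char) : '(' ∉ s.takeWhile (· ≠ '(') := by
  intro hmem
  have := List.mem_takeWhile_imp hmem
  simp at this

theorem pvALoop_eq_pvBLoop (s : List Char) : pvALoop s = pvBLoop s := by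
  induction s using pvBLoop.induct with
  | case1 s h =>
    have hs : s = s.takeWhile (· ≠ '(') := by
      conv_lhs => rw [← List.takeWhile_append_dropWhile (p := (· ≠ '(')) (l := s)]
      rw [h]; simp
    rw [pvBLoop, h]
    calc pvALoop s = pvALoop (s.takeWhile (· ≠ '(') ++ []) := by rw [← hs]; simp
      _ = pvBCount (s.takeWhile (· ≠ '(')) + pvALoop [] :=
          pvALoop_append _ _ (pvTakeWhile_no_open s)
      _ = pvBCount s := by rw [← hs]; simp [pvALoop]
  | case2 s x after h h2 =>
    have hx : x = '(' := by
      have := pvDropWhile_head_false _ _ _ h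
      simpa using this
    have hsplit : s = s.takeWhile (· ≠ '(') ++ '(' :: after := by
      conv_lhs => rw [← List.takeWhile_append_dropWhile (p := (· ≠ '(')) (l := s)]
      rw [h, hx]
    rw [pvBLoop, h]
    dsimp only
    rw [h2]
    conv_lhs => rw [hsplit]
    rw [pvALoop_append _ _ (pvTakeWhile_no_open s)]
    simp only [pvALoop, pvACollect_eq, h2, List.drop_nil]
    simp
  | case3 s x after h y tail h2 ih =>
    have hx : x = '(' := by
      have := pvDropWhile_head_false _ _ _ h
      simpa using this
    have hsplit : s = s.takeWhile (· ≠ '(') ++ '(' :: after := by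
      conv_lhs => rw [← List.takeWhile_append_dropWhile (p := (· ≠ '(')) (l := s)]
      rw [h, hx]
    rw [pvBLoop, h]
    dsimp only
    rw [h2]
    conv_lhs => rw [hsplit]
    rw [pvALoop_append _ _ (pvTakeWhile_no_open s)]
    simp only [pvALoop, pvACollect_eq, h2, List.drop_succ_cons, List.drop_zero]
    simp only [if_true]
    rw [ih]
    ring

-- ===== VERDICT (by name: the statement is the Claim_ definition above) =====
theorem calculate_picture_size_py_spec : Claim_equal_calculate_picture_size_py := by
  intro pic_str _
  unfold Spec_calculate_picture_size_py calculate_picture_size_py calculate_picture_size_py_alt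
  rw [pvALoop_eq_pvBLoop]
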